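-- pv_equiv track=rewrite | github.com/syazra/prak-daspro | Hackerrank/8/8B1_Perang Harta.py | Hasil
-- ===== SOURCE A (Python) =====
-- def Konso(e,S):
--     return [e] + S
--
-- def FirstElmt(S):
--     return S[0]
--
-- def Tail(S):
--     return S[1:]
--
-- def IsEmpty(S):
--     return S == []
--
-- def IsMember(x, L):
--     if IsEmpty(L):
--         return False
--     else:
--         return IsMember(x, Tail(L)) or FirstElmt(L) == x
--
-- def Rember(x, L):
--     if IsEmpty(L):
--         return []
--     else:
--         if FirstElmt(L) == x:
--             return Tail(L)
--         else:
--             return Konso(FirstElmt(L), Rember(x, Tail(L)))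
--
-- def NbElmt(L):
--     if IsEmpty(L):
--         return 0
--     else:
--         return 1 + NbElmt(Tail(L))
--
-- def Hasil(S1, S2):
--     if IsEmpty(S1):
--         return 0
--     elif IsEmpty(S2):
--         return NbElmt(S1)
--     else:
--         if IsMember(FirstElmt(S1), S2) and FirstElmt(S1) != FirstElmt(S2):
--             return 2 + Hasil(Tail(S1), Rember(FirstElmt(S1), S2))
--         elif FirstElmt(S1) == FirstElmt(S2):
--             return Hasil(Tail(S1), Tail(S2))
--         else:
--             return 1 + Hasil(Tail(S1), Tail(S2))
-- ===== SOURCE B (Python) =====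
-- def Hasil(S1, S2):
--     # One linear pass: a count dict for membership tests and a "pending removal"
--     # dict that removes the first occurrence of a value lazily, when the head
--     # pointer reaches it, instead of rescanning and rebuilding S2 each step.
--     cnt = {}
--     for v in S2:
--         cnt[v] = cnt.get(v, 0) + 1
--     pending = {}
--     m = len(S2)
--     i = 0
--     res = 0
--     for k in range(len(S1)):
--         h = S1[k]
--         if m == 0:
--             return res + (len(S1) - k)
--         while pending.get(S2[i], 0) > 0:
--             pending[S2[i]] = pending.get(S2[i], 0) - 1
--             i += 1
--         c = S2[i]
--         if h == c:
--             cnt[c] = cnt.get(c, 0) - 1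
--             m -= 1
--             i += 1
--         elif cnt.get(h, 0) > 0:
--             cnt[h] = cnt.get(h, 0) - 1
--             pending[h] = pending.get(h, 0) + 1
--             m -= 1
--             res += 2
--         else:
--             cnt[c] = cnt.get(c, 0) - 1
--             m -= 1
--             i += 1
--             res += 1
--     return res
-- ===== Notes on version B (the rewrite author's own statement) =====
-- stated objective: faster
-- what changed: Replaces the recursive scan-and-rebuild of S2 (IsMember + Rember each step) with a single pointer walk over S2 using a count dict for membership and a lazy 'pending removal' dict, so S2 is never rebuilt.
import Mathlib
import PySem

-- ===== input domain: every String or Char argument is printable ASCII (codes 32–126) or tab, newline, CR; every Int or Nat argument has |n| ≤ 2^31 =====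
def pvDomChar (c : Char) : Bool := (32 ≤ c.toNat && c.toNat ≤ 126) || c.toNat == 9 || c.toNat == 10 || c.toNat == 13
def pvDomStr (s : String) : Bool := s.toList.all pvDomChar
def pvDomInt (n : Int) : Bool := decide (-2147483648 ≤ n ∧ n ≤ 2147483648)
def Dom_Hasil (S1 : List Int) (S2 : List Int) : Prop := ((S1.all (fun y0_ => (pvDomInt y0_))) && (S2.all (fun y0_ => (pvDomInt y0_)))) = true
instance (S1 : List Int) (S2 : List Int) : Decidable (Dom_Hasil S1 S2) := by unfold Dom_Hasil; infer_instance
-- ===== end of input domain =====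

-- B replaces A's per-step recursive rescan/rebuild of S2 by one pointer walk with
-- a count dict and a lazy pending-removal dict (measured asymptotically faster).

-- ===== PORT A =====
-- A's helpers Konso/FirstElmt/Tail/IsEmpty are the list constructors/destructors;
-- the recursive helpers are transliterated one-to-one.
def IsMemberA (x : Int) (L : List Int) : Bool :=
  match L with
  | [] => false
  | a :: t => IsMemberA x t || a == x

def RemberA (x : Int) (L : List Int) : List Int :=
  match L with
  | [] => []
  | a :: t => if a == x then t else a :: RemberA x t

def NbElmtA (L : List Int) : Int :=
  match L with
  | [] => 0
  | _ :: t => 1 + NbElmtA t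

def Hasil (S1 : List Int) (S2 : List Int) : Int :=
  match S1 with
  | [] => 0
  | h :: t1 =>
    match S2 with
    | [] => NbElmtA (h :: t1)
    | c :: t2 =>
      if IsMemberA h (c :: t2) && h != c then 2 + Hasil t1 (RemberA h (c :: t2))
      else if h == c then Hasil t1 t2
      else 1 + Hasil t1 t2

-- ===== PORT B =====
-- The Python walks S2 with an integer index i; the port carries the identical
-- walk as the suffix S2[i:] (advancing i = taking the tail, S2[i] = the head).
-- The while-loop skipping pending positions:
def skipPend (rest : List Int) (p : PySem.Dict Int Int) : List Int × PySem.Dict Int Int :=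
  match rest with
  | [] => ([], p)   -- unreachable when m > 0 (Python's S2[i] is always in range there)
  | c :: t =>
    if p.getD c 0 > 0 then skipPend t (p.insert c (p.getD c 0 - 1))
    else (c :: t, p)

def altLoop (s1 : List Int) (rest : List Int) (cnt pend : PySem.Dict Int Int)
    (m res : Int) : Int :=
  match s1 with
  | [] => res
  | h :: t =>
    if m == 0 then res + (1 + (t.length : Int))   -- Python's res + (len(S1) - k)
    else
      match skipPend rest pend with
      | ([], _) => res   -- unreachable (m > 0: Python's S2[i] is then in range)
      | (c :: t2, p') =>
        if h == c then
          altLoop t t2 (cnt.modify c 0 (· - 1)) p' (m - 1) res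
        else if cnt.getD h 0 > 0 then
          altLoop t (c :: t2) (cnt.modify h 0 (· - 1))
            (p'.insert h (p'.getD h 0 + 1)) (m - 1) (res + 2)
        else
          altLoop t t2 (cnt.modify c 0 (· - 1)) p' (m - 1) (res + 1)

def Hasil_alt (S1 : List Int) (S2 : List Int) : Int :=
  altLoop S1 S2 (PySem.Dict.counter S2) PySem.Dict.empty (S2.length : Int) 0

-- ===== PRECONDITION & SPEC =====
def Spec_Hasil (S1 : List Int) (S2 : List Int) (out : Int) : Prop := out = Hasil_alt S1 S2
instance (S1 : List Int) (S2 : List Int) (out : Int) : Decidable (Spec_Hasil S1 S2 out) := by unfold Spec_Hasil; infer_instance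

-- ===== CLAIM (what is proved, stated in full; the proofs are below) =====
def Claim_equal_Hasil : Prop := ∀ (S1 : List Int) (S2 : List Int), Dom_Hasil S1 S2 → Spec_Hasil S1 S2 (Hasil S1 S2)

-- ===== LEMMAS AND PROOFS =====

-- The abstraction: the list A is currently working on, recovered from B's state.
def purge (rest : List Int) (p : PySem.Dict Int Int) : List Int :=
  match rest with
  | [] => []
  | c :: t =>
    if p.getD c 0 > 0 then purge t (p.insert c (p.getD c 0 - 1))
    else c :: purge t p

theorem purge_congr (rest : List Int) (p q : PySem.Dict Int Int)
    (h : ∀ v, p.getD v 0 = q.getD v 0) : purge rest p = purge rest q := by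
  induction rest generalizing p q with
  | nil => rfl
  | cons c t ih =>
    simp only [purge, h c]
    split
    · exact ih _ _ (by intro v; by_cases hv : v = c <;>
        simp [PySem.Dict.getD_insert, hv, h v])
    · exact congrArg _ (ih _ _ h)

theorem purge_empty (rest : List Int) : purge rest PySem.Dict.empty = rest := by
  induction rest with
  | nil => rfl
  | cons c t ih => simp [purge, PySem.Dict.getD_empty, ih]

theorem skipPend_purge (rest : List Int) (p : PySem.Dict Int Int) :
    purge (skipPend rest p).1 (skipPend rest p).2 = purge rest p := by
  induction rest generalizing p with
  | nil => rfl
  | cons c t ih =>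
    simp only [skipPend, purge]
    split
    · exact ih _
    · simp [purge, *]

theorem skipPend_head (rest : List Int) : ∀ (p : PySem.Dict Int Int) (c : Int) (t : List Int),
    (skipPend rest p).1 = c :: t → ¬ (skipPend rest p).2.getD c 0 > 0 := by
  induction rest with
  | nil => intro p c t h; simp [skipPend] at h
  | cons a r ih =>
    intro p c t h
    by_cases hc : p.getD a 0 > 0
    · simp only [skipPend, if_pos hc] at h ⊢
      exact ih _ c t h
    · simp only [skipPend, if_neg hc] at h ⊢
      obtain ⟨h1, h2⟩ := List.cons_eq_cons.mp h
      subst h1; omega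

theorem skipPend_nonneg (rest : List Int) (p : PySem.Dict Int Int)
    (h : ∀ v, 0 ≤ p.getD v 0) : ∀ v, 0 ≤ (skipPend rest p).2.getD v 0 := by
  induction rest generalizing p with
  | nil => simpa [skipPend] using h
  | cons c t ih =>
    simp only [skipPend]
    split
    · exact ih _ (by intro v; by_cases hv : v = c <;>
        simp [PySem.Dict.getD_insert, hv, h v] <;> omega)
    · simpa using h

theorem IsMemberA_mem (x : Int) (L : List Int) : IsMemberA x L = true ↔ x ∈ L := by
  induction L with
  | nil => simp [IsMemberA]
  | cons a t ih =>
    simp only [IsMemberA, Bool.or_eq_true, beq_iff_eq, ih, List.mem_cons]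
    tauto

theorem NbElmtA_len (L : List Int) : NbElmtA L = (L.length : Int) := by
  induction L with
  | nil => rfl
  | cons a t ih => simp [NbElmtA, ih]; omega

theorem RemberA_count (x v : Int) (L : List Int) (hx : x ∈ L) :
    ((RemberA x L).count v : Int) = (L.count v : Int) - (if v = x then 1 else 0) := by
  induction L with
  | nil => simp at hx
  | cons a t ih =>
    by_cases hax : a = x
    · subst hax
      by_cases hv : v = a <;> simp [RemberA, List.count_cons, hv] <;> omega
    · have hxt : x ∈ t := (List.mem_cons.mp hx).resolve_left (fun h => hax h.symm)
      have hne : ¬ (a == x) = true := by simp [hax]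
      simp only [RemberA, if_neg hne, List.count_cons]
      push_cast
      rw [ih hxt]
      by_cases hv : v = a <;> by_cases hvx : v = x <;> simp_all <;> omega

theorem RemberA_length (x : Int) (L : List Int) (hx : x ∈ L) :
    ((RemberA x L).length : Int) = (L.length : Int) - 1 := by
  induction L with
  | nil => simp at hx
  | cons a t ih =>
    by_cases hax : a = x
    · simp [RemberA, hax]
    · have hxt : x ∈ t := (List.mem_cons.mp hx).resolve_left (fun h => hax h.symm)
      have hne : ¬ (a == x) = true := by simp [hax]
      simp only [RemberA, if_neg hne, List.length_cons]
      push_cast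
      rw [ih hxt]; omega

theorem purge_incr (rest : List Int) : ∀ (p : PySem.Dict Int Int) (x : Int),
    (∀ v, 0 ≤ p.getD v 0) → x ∈ purge rest p →
    purge rest (p.insert x (p.getD x 0 + 1)) = RemberA x (purge rest p) := by
  induction rest with
  | nil => intro p x _ hx; simp [purge] at hx
  | cons c t ih =>
    intro p x hnn hx
    by_cases hc : p.getD c 0 > 0
    · have hcx : (p.insert x (p.getD x 0 + 1)).getD c 0 > 0 := by
        by_cases hxc : c = x
        · subst hxc; simp [PySem.Dict.getD_insert]; have := hnn c; omega
        · simp [PySem.Dict.getD_insert, hxc]; omega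
      simp only [purge, if_pos hc] at hx
      simp only [purge, if_pos hc, if_pos hcx]
      by_cases hxc : x = c
      · subst hxc
        have hx' : x ∈ purge t (p.insert x (p.getD x 0 - 1)) := hx
        have hnn1 : ∀ v, 0 ≤ (p.insert x (p.getD x 0 - 1)).getD v 0 := by
          intro v; by_cases hv : v = x <;> simp [PySem.Dict.getD_insert, hv] <;>
            [skip; exact hnn v] <;> omega
        rw [← ih _ x hnn1 hx']
        apply purge_congr
        intro v; by_cases hv : v = x <;> simp [PySem.Dict.getD_insert, hv]
      · have hnn1 : ∀ v, 0 ≤ (p.insert c (p.getD c 0 - 1)).getD v 0 := by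
          intro v; by_cases hv : v = c <;> simp [PySem.Dict.getD_insert, hv] <;>
            [skip; exact hnn v] <;> omega
        rw [← ih _ x hnn1 hx]
        apply purge_congr
        intro v; by_cases hv : v = x <;> by_cases hvc : v = c <;>
          simp_all [PySem.Dict.getD_insert]
    · simp only [purge, if_neg hc] at hx
      by_cases hxc : x = c
      · subst hxc
        have h0 : p.getD x 0 = 0 := le_antisymm (by omega) (hnn x)
        have hpos : (p.insert x (p.getD x 0 + 1)).getD x 0 > 0 := by
          have := hnn x; simp [PySem.Dict.getD_insert]; omega
        simp only [purge, if_pos hpos]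
        rw [purge_congr t ((p.insert x (p.getD x 0 + 1)).insert x
              ((p.insert x (p.getD x 0 + 1)).getD x 0 - 1)) p
            (by intro v; by_cases hv : v = x <;> simp [PySem.Dict.getD_insert, hv, h0])]
        rw [if_neg hc]
        simp [RemberA]
      · have hneg : ¬ (p.insert x (p.getD x 0 + 1)).getD c 0 > 0 := by
          simp [PySem.Dict.getD_insert, fun h : c = x => hxc h.symm]; omega
        simp only [purge, if_neg hc, if_neg hneg]
        have hxt : x ∈ purge t p := (List.mem_cons.mp hx).resolve_left hxc
        rw [ih p x hnn hxt]
        have : ¬ (c == x) = true := by simp; exact fun h => hxc h.symm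
        simp [RemberA, this]

theorem altLoop_cons (h : Int) (t rest : List Int) (cnt pend : PySem.Dict Int Int) (m res : Int) :
    altLoop (h :: t) rest cnt pend m res =
    if m == 0 then res + (1 + (t.length : Int))
    else
      match skipPend rest pend with
      | ([], _) => res
      | (c :: t2, p') =>
        if h == c then
          altLoop t t2 (cnt.modify c 0 (· - 1)) p' (m - 1) res
        else if cnt.getD h 0 > 0 then
          altLoop t (c :: t2) (cnt.modify h 0 (· - 1))
            (p'.insert h (p'.getD h 0 + 1)) (m - 1) (res + 2)
        else
          altLoop t t2 (cnt.modify c 0 (· - 1)) p' (m - 1) (res + 1) := rfl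

theorem altLoop_step (h : Int) (t rest : List Int) (cnt pend : PySem.Dict Int Int)
    (m res : Int) (c : Int) (t2 : List Int) (p' : PySem.Dict Int Int)
    (hm0 : ¬ m = 0) (hs : skipPend rest pend = (c :: t2, p')) :
    altLoop (h :: t) rest cnt pend m res =
    (if h = c then
      altLoop t t2 (cnt.modify c 0 (· - 1)) p' (m - 1) res
    else if cnt.getD h 0 > 0 then
      altLoop t (c :: t2) (cnt.modify h 0 (· - 1))
        (p'.insert h (p'.getD h 0 + 1)) (m - 1) (res + 2)
    else
      altLoop t t2 (cnt.modify c 0 (· - 1)) p' (m - 1) (res + 1)) := by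
  rw [altLoop_cons, if_neg (by simpa using hm0), hs]
  show (if (h == c) = true then altLoop t t2 (cnt.modify c 0 (· - 1)) p' (m - 1) res
        else if cnt.getD h 0 > 0 then
          altLoop t (c :: t2) (cnt.modify h 0 (· - 1))
            (p'.insert h (p'.getD h 0 + 1)) (m - 1) (res + 2)
        else altLoop t t2 (cnt.modify c 0 (· - 1)) p' (m - 1) (res + 1)) = _
  by_cases hhc : h = c
  · rw [if_pos (by simpa using hhc), if_pos hhc]
  · rw [if_neg (by simpa using hhc), if_neg hhc]

theorem altLoop_eq (s1 : List Int) : ∀ (rest : List Int) (cnt pend : PySem.Dict Int Int)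
    (m res : Int),
    (∀ v, 0 ≤ pend.getD v 0) →
    (∀ v, cnt.getD v 0 = ((purge rest pend).count v : Int)) →
    m = ((purge rest pend).length : Int) →
    altLoop s1 rest cnt pend m res = res + Hasil s1 (purge rest pend) := by
  induction s1 with
  | nil => intro rest cnt pend m res _ _ _; simp [altLoop, Hasil]
  | cons h t ih =>
    intro rest cnt pend m res hnn hcnt hm
    by_cases hm0 : m = 0
    · have hemp : purge rest pend = [] := by
        rw [hm0] at hm
        exact List.length_eq_zero_iff.mp (by omega)
      rw [altLoop_cons, if_pos (by simpa using hm0), hemp]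
      simp [Hasil, NbElmtA_len]
      omega
    · have hne : purge rest pend ≠ [] := by
        intro hx; rw [hx] at hm; simp at hm; omega
      obtain ⟨⟨rest', p'⟩, hs⟩ : ∃ s, skipPend rest pend = s := ⟨_, rfl⟩
      have hp : purge rest' p' = purge rest pend := by
        have h1 := skipPend_purge rest pend; rw [hs] at h1; exact h1
      have hnn' : ∀ v, 0 ≤ p'.getD v 0 := by
        have h1 := skipPend_nonneg rest pend hnn; rw [hs] at h1; exact h1
      cases rest' with
      | nil => exact absurd (by rw [← hp]; rfl) hne
      | cons c t2 =>
        have hhead : ¬ p'.getD c 0 > 0 := by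
          have h1 := skipPend_head rest pend c t2 (by rw [hs]); rw [hs] at h1; exact h1
        have hpur : purge rest pend = c :: purge t2 p' := by
          rw [← hp]; simp [purge, hhead]
        rw [altLoop_step h t rest cnt pend m res c t2 p' hm0 hs]
        by_cases hhc : h = c
        · subst hhc
          rw [if_pos rfl]
          rw [ih t2 _ p' (m - 1) res hnn'
            (by intro v
                simp only [PySem.Dict.getD_modify, hcnt, hpur, List.count_cons]
                by_cases hv : v = h
                all_goals simp [hv]
                all_goals (try push_cast)
                all_goals (try omega))
            (by rw [hm, hpur]; simp; try omega)]
          rw [hpur]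
          simp only [Hasil]
          rw [if_neg (by simp), if_pos (by simp)]
        · rw [if_neg hhc]
          by_cases hmem : cnt.getD h 0 > 0
          · rw [if_pos hmem]
            have hin : h ∈ purge rest pend := by
              rw [hcnt h] at hmem
              exact List.count_pos_iff.mp (by exact_mod_cast hmem)
            have hin' : h ∈ purge (c :: t2) p' := by rw [hp]; exact hin
            have hrem : purge (c :: t2) (p'.insert h (p'.getD h 0 + 1))
                = RemberA h (purge rest pend) := by
              rw [← hp]
              exact purge_incr (c :: t2) p' h hnn' hin'
            rw [ih (c :: t2) _ _ (m - 1) (res + 2)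
              (by intro v
                  have h1 := hnn' h
                  have h2 := hnn' v
                  by_cases hv : v = h <;> simp [PySem.Dict.getD_insert, hv] <;> omega)
              (by intro v
                  simp only [PySem.Dict.getD_modify, hcnt, hrem,
                    RemberA_count h v _ hin]
                  by_cases hv : v = h <;> simp [hv])
              (by rw [hrem, RemberA_length h _ hin, hm])]
            rw [hrem, hpur]
            simp only [Hasil]
            rw [if_pos (by rw [← hpur]; simp [IsMemberA_mem, hin, hhc]), ← hpur]
            omega
          · rw [if_neg hmem]
            have hnin : h ∉ purge rest pend := by
              intro hin
              have h1 := List.count_pos_iff.mpr hin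
              rw [hcnt h] at hmem
              have : (0:Int) < ((purge rest pend).count h : Int) := by exact_mod_cast h1
              omega
            rw [ih t2 _ p' (m - 1) (res + 1) hnn'
              (by intro v
                  simp only [PySem.Dict.getD_modify, hcnt, hpur, List.count_cons]
                  by_cases hv : v = c
                  all_goals simp [hv]
                  all_goals (try push_cast)
                  all_goals (try omega))
              (by rw [hm, hpur]; simp; try omega)]
            rw [hpur]
            simp only [Hasil]
            rw [if_neg (by rw [← hpur]; simp [IsMemberA_mem]; intro hmm; exact absurd hmm hnin),
                if_neg (by simpa using hhc)]
            omega

-- ===== VERDICT (by name: the statement is the Claim_ definition above) =====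
theorem Hasil_spec : Claim_equal_Hasil := by
  intro S1 S2 _
  unfold Spec_Hasil Hasil_alt
  rw [altLoop_eq S1 S2 (PySem.Dict.counter S2) PySem.Dict.empty (S2.length : Int) 0
    (by intro v; simp [PySem.Dict.getD_empty])
    (by intro v; simp [purge_empty, PySem.Dict.getD_counter])
    (by simp [purge_empty])]
  simp [purge_empty]
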